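-- pv_equiv track=rewrite | github.com/aamer-akram/telegram_bot | telegram_bot.py | get_day_names
-- ===== SOURCE A (Python) =====
-- def get_day_names(num_days):
--     """الحصول على أسماء الأيام تبدأ من الأحد"""
--     all_days = ['الأحد', 'الإثنين', 'الثلاثاء', 'الأربعاء', 'الخميس', 'الجمعة', 'السبت']
--
--     if num_days <= 7:
--         return all_days[:num_days]
--     else:
--         days = []
--         for i in range(num_days):
--             day_index = i % 7
--             days.append(all_days[day_index])
--         return days
-- ===== SOURCE B (Python) =====
-- def get_day_names(num_days):
--     """الحصول على أسماء الأيام تبدأ من الأحد"""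
--     all_days = ['الأحد', 'الإثنين', 'الثلاثاء', 'الأربعاء', 'الخميس', 'الجمعة', 'السبت']
--     if num_days <= 7:
--         return all_days[:num_days]
--     else:
--         return (all_days * (num_days // 7 + 1))[:num_days]
-- ===== Notes on version B (the rewrite author's own statement) =====
-- stated objective: idiomatic
-- what changed: The per-element i%7 indexing loop is replaced by concatenating num_days//7+1 copies of the week via list repetition and slicing to length.
import Mathlib
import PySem

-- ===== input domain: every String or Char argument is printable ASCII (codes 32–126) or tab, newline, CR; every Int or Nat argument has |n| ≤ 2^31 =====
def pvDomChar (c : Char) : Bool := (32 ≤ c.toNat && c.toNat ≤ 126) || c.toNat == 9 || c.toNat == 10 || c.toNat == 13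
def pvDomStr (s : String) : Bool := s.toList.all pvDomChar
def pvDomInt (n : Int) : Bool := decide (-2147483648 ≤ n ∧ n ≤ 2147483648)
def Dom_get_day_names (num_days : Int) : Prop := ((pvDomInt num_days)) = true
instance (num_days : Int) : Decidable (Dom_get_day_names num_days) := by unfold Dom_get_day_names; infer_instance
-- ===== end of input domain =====

-- B replaces the per-element i%7 indexing loop by list repetition plus a slice (more idiomatic).

-- ===== PORT A =====
def pvAllDays : List String :=
  ["الأحد", "الإثنين", "الثلاثاء", "الأربعاء", "الخميس", "الجمعة", "السبت"]

def get_day_names (num_days : Int) : List String :=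
  if num_days ≤ 7 then
    PySem.List.slice pvAllDays none (some num_days)
  else
    -- for i in range(num_days): days.append(all_days[i % 7])
    -- the index i % 7 is always in range, so the pyGetD default is unreachable
    (PySem.List.pyRange 0 num_days 1).foldl
      (fun days i => days ++ [PySem.List.pyGetD pvAllDays (PySem.Int.mod i 7) ""]) []

-- ===== PORT B =====
def get_day_names_alt (num_days : Int) : List String :=
  if num_days ≤ 7 then
    PySem.List.slice pvAllDays none (some num_days)
  else
    -- (all_days * (num_days // 7 + 1))[:num_days]
    PySem.List.slice
      ((List.replicate (PySem.Int.floordiv num_days 7 + 1).toNat pvAllDays).flatten)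
      none (some num_days)

-- ===== PRECONDITION & SPEC =====
def Spec_get_day_names (num_days : Int) (out : List String) : Prop := out = get_day_names_alt num_days
instance (num_days : Int) (out : List String) : Decidable (Spec_get_day_names num_days out) := by unfold Spec_get_day_names; infer_instance

-- ===== CLAIM (what is proved, stated in full; the proofs are below) =====
def Claim_equal_get_day_names : Prop := ∀ (num_days : Int), Dom_get_day_names num_days → Spec_get_day_names num_days (get_day_names num_days)

-- ===== LEMMAS AND PROOFS =====

-- the cyclic element: day name at position i
def pvCyc (i : Nat) : String := pvAllDays.getD (i % 7) ""

-- A's loop over range(k) builds the map of pvCyc over range k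
theorem pvLoopA (k : Nat) :
    (PySem.List.pyRange 0 (k : Int) 1).foldl
      (fun days i => days ++ [PySem.List.pyGetD pvAllDays (PySem.Int.mod i 7) ""]) []
    = (List.range k).map pvCyc := by
  induction k with
  | zero => simp [PySem.List.pyRange]
  | succ k ih =>
    have h : (0 : Int) ≤ (k : Int) := by positivity
    push_cast
    rw [PySem.List.pyRange_one_succ_right h, List.foldl_append]
    push_cast at ih
    rw [ih, List.range_succ, List.map_append]
    have hm : PySem.Int.mod (k : Int) 7 = ((k % 7 : Nat) : Int) := by
      exact_mod_cast PySem.Int.mod_natCast k 7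
    simp only [List.foldl_cons, List.foldl_nil, List.map_cons, List.map_nil, hm,
      PySem.List.pyGetD_natCast, pvCyc]

-- pvLoopA restated over a nonnegative Int bound
theorem pvLoopA' (n : Int) (hn : 0 ≤ n) :
    (PySem.List.pyRange 0 n 1).foldl
      (fun days i => days ++ [PySem.List.pyGetD pvAllDays (PySem.Int.mod i 7) ""]) []
    = (List.range n.toNat).map pvCyc := by
  have := pvLoopA n.toNat
  rwa [Int.toNat_of_nonneg hn] at this

-- each element of m concatenated weeks is the cyclic day name
theorem pvFlatGet (m i : Nat) (h : i < 7 * m) :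
    ((List.replicate m pvAllDays).flatten).getD i "" = pvCyc i := by
  induction m generalizing i with
  | zero => omega
  | succ m ih =>
    rw [List.replicate_succ, List.flatten_cons]
    by_cases h7 : i < 7
    · have : i % 7 = i := Nat.mod_eq_of_lt h7
      rw [List.getD_append _ _ _ _ (by simp [pvAllDays]; omega)]
      simp [pvCyc, this]
    · have hlen : pvAllDays.length = 7 := by simp [pvAllDays]
      rw [List.getD_append_right _ _ _ _ (by omega)]
      rw [hlen]
      have := ih (i - 7) (by omega)
      rw [this]
      unfold pvCyc
      congr 1
      omega

theorem pvFlatTake (m k : Nat) (h : k ≤ 7 * m) :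
    ((List.replicate m pvAllDays).flatten).take k = (List.range k).map pvCyc := by
  have hlen : ((List.replicate m pvAllDays).flatten).length = 7 * m := by
    simp [pvAllDays, Nat.mul_comm]
  apply List.ext_getElem
  · simp [hlen]; omega
  · intro i h1 h2
    have hi : i < k := by simp [hlen] at h1; exact h1.1
    have hflat : i < 7 * m := by omega
    have := pvFlatGet m i hflat
    rw [List.getElem_take, List.getElem_map, List.getElem_range]
    rw [List.getD_eq_getElem _ _ (by omega)] at this
    exact this

-- ===== VERDICT (by name: the statement is the Claim_ definition above) =====
theorem get_day_names_spec : Claim_equal_get_day_names := by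
  intro n _
  unfold Spec_get_day_names get_day_names get_day_names_alt
  by_cases h : n ≤ 7
  · simp [h]
  · simp only [h, if_false]
    have hn : (0 : Int) ≤ n := by omega
    have hfd : PySem.Int.floordiv n 7 = n / 7 := PySem.Int.floordiv_eq_ediv_of_pos (by omega)
    rw [PySem.List.slice_to _ hn]
    have hle : n.toNat ≤ 7 * (PySem.Int.floordiv n 7 + 1).toNat := by rw [hfd]; omega
    rw [pvLoopA' n hn, pvFlatTake _ _ hle]
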